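-- pv_equiv track=rewrite | github.com/axelpale/gazelledb | data/functions/saccade_em/interpolate.py | interpolate_using_previous
-- ===== SOURCE A (Python) =====
-- class InterpolationError(Exception):
-- 	pass
--
-- def interpolate_using_previous(dictlist, keys):
-- 	'''
-- 	Throw
-- 		InterpolationError
-- 			if a key has no non-null values
-- 	'''
-- 	dl = dictlist # alias
-- 	ndl = [] # new, interpolated dictlist
--
-- 	if len(dl) < 1:
-- 		raise InterpolationError('Empty list cannot be interpolated')
--
-- 	first_nonnull = {}
--
-- 	# Find first non-nulls
-- 	for k in keys:
-- 		for d in dl: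
-- 			if d[k] is not None:
-- 				first_nonnull[k] = d[k]
-- 				break
--
-- 	if len(first_nonnull.keys()) != len(keys):
-- 		# No good values found for every key
-- 		raise InterpolationError('No non-null values to interpolate against: ' + str(first_nonnull))
--
-- 	prev_nonnull = first_nonnull
--
-- 	for d in dl:
-- 		nd = d.copy()
-- 		for k in keys:
-- 			if nd[k] is None:
-- 				nd[k] = prev_nonnull[k]
-- 			else:
-- 				prev_nonnull[k] = nd[k]
-- 		ndl.append(nd)
--
-- 	return ndl
-- ===== SOURCE B (Python) =====
-- class InterpolationError(Exception):
--     pass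
--
-- def interpolate_using_previous(dictlist, keys):
--     '''
--     Throw
--         InterpolationError
--             if a key has no non-null values
--     '''
--     if not dictlist:
--         raise InterpolationError('Empty list cannot be interpolated')
--
--     n = len(dictlist)
--
--     # Sparse, column-oriented algorithm: for each key collect the positions of
--     # its non-null values, then materialise the filled column by expanding the
--     # runs between consecutive non-null positions (the stretch before the first
--     # non-null is back-filled with that first value).
--     cols = {}
--     for k in keys:
--         pts = [(i, d[k]) for i, d in enumerate(dictlist) if d[k] is not None]
--         if not pts:
--             raise InterpolationError('No non-null values to interpolate against for key: ' + repr(k))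
--         col = [pts[0][1]] * pts[0][0]
--         for (i, v), (j, _) in zip(pts, pts[1:] + [(n, None)]):
--             col += [v] * (j - i)
--         cols[k] = col
--
--     # Rebuild the rows from the filled columns.
--     return [{**d, **{k: cols[k][i] for k in keys}} for i, d in enumerate(dictlist)]
-- ===== Notes on version B (the rewrite author's own statement) =====
-- stated objective: alternative
-- what changed: A scans row-by-row threading a dict of previous non-null values; B works on a sparse per-key representation (positions of the non-null values), materialises each filled column by expanding the runs between consecutive non-null positions with list repetition, and then rebuilds the rows from the columns.
import Mathlib
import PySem

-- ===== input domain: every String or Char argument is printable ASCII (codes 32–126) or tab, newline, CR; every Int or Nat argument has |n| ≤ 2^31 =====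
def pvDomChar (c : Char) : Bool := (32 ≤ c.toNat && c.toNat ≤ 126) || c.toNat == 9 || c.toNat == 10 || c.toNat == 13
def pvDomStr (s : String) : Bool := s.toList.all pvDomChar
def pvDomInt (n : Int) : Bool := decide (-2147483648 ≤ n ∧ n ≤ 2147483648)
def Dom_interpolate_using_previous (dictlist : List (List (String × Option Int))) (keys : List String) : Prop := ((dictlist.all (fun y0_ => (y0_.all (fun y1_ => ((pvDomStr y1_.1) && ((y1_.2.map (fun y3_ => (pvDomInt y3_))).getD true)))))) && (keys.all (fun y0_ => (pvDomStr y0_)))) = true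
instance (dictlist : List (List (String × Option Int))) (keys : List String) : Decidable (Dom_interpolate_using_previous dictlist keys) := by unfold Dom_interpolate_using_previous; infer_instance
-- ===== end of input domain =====

-- A fills row-by-row, threading a dict of previous non-null values across the rows; B collects, per
-- key, the positions of the non-null values and materialises the filled column by expanding the runs
-- between consecutive non-null positions, then rebuilds the rows from the columns ("alternative").

-- ===== PORT A =====
-- inner loop `for d in dl: if d[k] is not None: … break` (missing key = KeyError, excluded by Pre_)
def aFirstLoop (dl : List (PySem.Dict String (Option Int))) (k : String) : Option Int :=
  match dl with
  | [] => none
  | d :: rest =>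
    match (d.get? k).getD none with
    | some v => some v
    | none => aFirstLoop rest k

-- `for k in keys: … first_nonnull[k] = d[k]`
def aFirstNonnull (dl : List (PySem.Dict String (Option Int))) (keys : List String) :
    PySem.Dict String (Option Int) :=
  keys.foldl (fun fn k =>
    match aFirstLoop dl k with
    | some v => fn.insert k (some v)
    | none => fn) PySem.Dict.empty

-- body of `for k in keys:` inside the main row loop; state = (nd, prev_nonnull)
def aStep (st : PySem.Dict String (Option Int) × PySem.Dict String (Option Int)) (k : String) :
    PySem.Dict String (Option Int) × PySem.Dict String (Option Int) :=
  match (st.1.get? k).getD none with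
  | none => (st.1.insert k ((st.2.get? k).getD none), st.2)
  | some v => (st.1, st.2.insert k (some v))

-- `for d in dl: nd = d.copy(); …; ndl.append(nd)`
def aMain (dl : List (PySem.Dict String (Option Int))) (keys : List String)
    (prev : PySem.Dict String (Option Int)) : List (PySem.Dict String (Option Int)) :=
  match dl with
  | [] => []
  | d :: rest =>
    (keys.foldl aStep (d, prev)).1 :: aMain rest keys (keys.foldl aStep (d, prev)).2

def interpolate_using_previous (dictlist : List (List (String × Option Int))) (keys : List String) : List (List (String × Option Int)) :=
  let dl := dictlist.map PySem.Dict.ofList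
  if dl.length < 1 then []        -- A raises InterpolationError (outside Pre_)
  else
    let fn := aFirstNonnull dl keys
    if fn.keys.length ≠ keys.length then []   -- A raises InterpolationError (outside Pre_)
    else (aMain dl keys fn).map PySem.Dict.items

-- ===== PORT B =====
-- `pts = [(i, d[k]) for i, d in enumerate(dictlist) if d[k] is not None]`
def bPts (dl : List (PySem.Dict String (Option Int))) (k : String) : List (Int × Int) :=
  (PySem.List.enumerate dl).filterMap (fun p => ((p.2.get? k).getD none).map (fun v => (p.1, v)))

-- `for (i, v), (j, _) in zip(pts, pts[1:] + [(n, None)]): col += [v] * (j - i)`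
def bRuns (pts : List (Int × Int)) (n : Int) : List Int :=
  match pts with
  | [] => []
  | (i, v) :: rest =>
    let j := match rest with | [] => n | (j', _) :: _ => j'
    List.replicate (j - i).toNat v ++ bRuns rest n

-- `cols = {}; for k in keys: … cols[k] = col` with the in-loop `raise` modelled as `none`
def bCols (dl : List (PySem.Dict String (Option Int))) (keys : List String) :
    Option (PySem.Dict String (List Int)) :=
  keys.foldlM (fun cols k =>
    match bPts dl k with
    | [] => none                  -- B raises InterpolationError (outside Pre_)
    | (i0, v0) :: rest =>
        some (cols.insert k
          (List.replicate i0.toNat v0 ++ bRuns ((i0, v0) :: rest) (PySem.List.len dl))))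
    PySem.Dict.empty

def interpolate_using_previous_alt (dictlist : List (List (String × Option Int))) (keys : List String) : List (List (String × Option Int)) :=
  let dl := dictlist.map PySem.Dict.ofList
  if dl.length < 1 then []        -- B raises InterpolationError (outside Pre_)
  else
    match bCols dl keys with
    | none => []                  -- B raises InterpolationError (outside Pre_)
    | some cols =>
      -- `[{**d, **{k: cols[k][i] for k in keys}} for i, d in enumerate(dictlist)]`
      -- (the defaults of getD/pyGetD are never used: cols has every k and every column has length n)
      (PySem.List.enumerate dl).map (fun p =>
        let upd := keys.foldl
          (fun u k => u.insert k (PySem.List.pyGetD (cols.getD k []) p.1 0)) PySem.Dict.empty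
        (upd.items.foldl (fun nd q => nd.insert q.1 (some q.2)) p.2).items)

-- ===== PRECONDITION & SPEC =====
-- Exactly where Python A returns: a nonempty list, no duplicate key in `keys` (a duplicate makes the
-- length check fail → InterpolationError), every key present in every row (else KeyError), and every
-- key with at least one non-null value (else InterpolationError).
def Pre_interpolate_using_previous (dictlist : List (List (String × Option Int))) (keys : List String) : Prop :=
  dictlist ≠ [] ∧ keys.Nodup ∧
  ∀ k ∈ keys, (∀ d ∈ dictlist, k ∈ d.map Prod.fst) ∧
    (∃ d ∈ dictlist, ((PySem.Dict.ofList d).get? k).getD none ≠ none)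
instance (dictlist : List (List (String × Option Int))) (keys : List String) : Decidable (Pre_interpolate_using_previous dictlist keys) := by unfold Pre_interpolate_using_previous; infer_instance

def pvWitness_interpolate_using_previous : (List (List (String × Option Int))) × List String :=
  ([[("a", none), ("b", some 5)], [("a", some 1), ("b", none)]], ["a", "b"])

def Spec_interpolate_using_previous (dictlist : List (List (String × Option Int))) (keys : List String) (out : List (List (String × Option Int))) : Prop := out = interpolate_using_previous_alt dictlist keys
instance (dictlist : List (List (String × Option Int))) (keys : List String) (out : List (List (String × Option Int))) : Decidable (Spec_interpolate_using_previous dictlist keys out) := by unfold Spec_interpolate_using_previous; infer_instance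

-- ===== CLAIM (what is proved, stated in full; the proofs are below) =====
def Claim_equal_interpolate_using_previous : Prop := ∀ (dictlist : List (List (String × Option Int))) (keys : List String), Dom_interpolate_using_previous dictlist keys → Pre_interpolate_using_previous dictlist keys → Spec_interpolate_using_previous dictlist keys (interpolate_using_previous dictlist keys)

-- ===== LEMMAS AND PROOFS =====

-- proof-side intermediate: A's inner key loop as a per-column forward fill (`colFill`), the forward
-- fill of a column of values (`ffill`), the extracted column (`colVals`) and B's sparse points
-- (`ptsFrom`, the value of `bPts`)

def colFill (ndl : List (PySem.Dict String (Option Int))) (k : String) (prev : Option Int) :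
    List (PySem.Dict String (Option Int)) :=
  match ndl with
  | [] => []
  | nd :: rest =>
    match (nd.get? k).getD none with
    | none => nd.insert k prev :: colFill rest k prev
    | some v => nd :: colFill rest k (some v)

def colVals (ndl : List (PySem.Dict String (Option Int))) (k : String) : List (Option Int) :=
  ndl.map (fun d => (d.get? k).getD none)

def ffill : List (Option Int) → Int → List Int
  | [], _ => []
  | none :: r, p => p :: ffill r p
  | some v :: r, _ => v :: ffill r v

def ptsFrom (s : Int) : List (Option Int) → List (Int × Int)
  | [] => []
  | none :: r => ptsFrom (s + 1) r
  | some v :: r => (s, v) :: ptsFrom (s + 1) r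

theorem length_ffill (vals : List (Option Int)) (p : Int) : (ffill vals p).length = vals.length := by
  induction vals generalizing p with
  | nil => rfl
  | cons v r ih => cases v <;> simp [ffill, ih]

theorem length_colVals (ndl : List (PySem.Dict String (Option Int))) (k : String) :
    (colVals ndl k).length = ndl.length := by simp [colVals]

-- ---------- A-side: the row loop is a fold of per-column forward fills ----------

theorem aFold_cong (ks : List String) (nd p₁ p₂ : PySem.Dict String (Option Int))
    (h : ∀ j ∈ ks, p₁.get? j = p₂.get? j) :
    (ks.foldl aStep (nd, p₁)).1 = (ks.foldl aStep (nd, p₂)).1 ∧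
    (∀ j, p₁.get? j = p₂.get? j →
      (ks.foldl aStep (nd, p₁)).2.get? j = (ks.foldl aStep (nd, p₂)).2.get? j) := by
  induction ks generalizing nd p₁ p₂ with
  | nil => exact ⟨rfl, fun j hj => hj⟩
  | cons k ks ih =>
    have hk : p₁.get? k = p₂.get? k := h k (by simp)
    cases hv : (nd.get? k).getD none with
    | none =>
      simp only [List.foldl_cons, aStep, hk, hv]
      exact ih _ _ _ (fun j hj => h j (by simp [hj]))
    | some v =>
      simp only [List.foldl_cons, aStep, hv]
      have hins : ∀ j, p₁.get? j = p₂.get? j →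
          (p₁.insert k (some v)).get? j = (p₂.insert k (some v)).get? j := by
        intro j hj
        rw [PySem.Dict.get?_insert, PySem.Dict.get?_insert]
        split
        · rfl
        · exact hj
      obtain ⟨h1, h2⟩ := ih nd (p₁.insert k (some v)) (p₂.insert k (some v))
        (fun j hj => hins j (h j (by simp [hj])))
      exact ⟨h1, fun j hj => h2 j (hins j hj)⟩

theorem aFold_prev_not_mem (ks : List String) (nd p : PySem.Dict String (Option Int))
    (k : String) (hk : k ∉ ks) :
    (ks.foldl aStep (nd, p)).2.get? k = p.get? k := by
  induction ks generalizing nd p with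
  | nil => rfl
  | cons k' ks ih =>
    have hne : k ≠ k' := by rintro rfl; exact hk (by simp)
    have hk' : k ∉ ks := fun h => hk (List.mem_cons_of_mem _ h)
    cases hv : (nd.get? k').getD none with
    | none =>
      simp only [List.foldl_cons, aStep, hv]
      exact ih _ _ hk'
    | some v =>
      simp only [List.foldl_cons, aStep, hv]
      rw [ih _ _ hk', PySem.Dict.get?_insert, if_neg hne]

theorem aMain_cong (dl : List (PySem.Dict String (Option Int))) (ks : List String)
    (p₁ p₂ : PySem.Dict String (Option Int)) (h : ∀ j ∈ ks, p₁.get? j = p₂.get? j) :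
    aMain dl ks p₁ = aMain dl ks p₂ := by
  induction dl generalizing p₁ p₂ with
  | nil => rfl
  | cons d rest ih =>
    obtain ⟨h1, h2⟩ := aFold_cong ks d p₁ p₂ h
    simp only [aMain, h1]
    rw [ih _ _ (fun j hj => h2 j (h j hj))]

-- pre-filling column k (k not among the remaining keys) commutes with the row loop
theorem aMain_swap (ks : List String) (k : String) (hk : k ∉ ks) :
    ∀ (dl : List (PySem.Dict String (Option Int))) (prev : PySem.Dict String (Option Int)),
    aMain (colFill dl k ((prev.get? k).getD none)) ks prev = aMain dl (k :: ks) prev := by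
  intro dl
  induction dl with
  | nil => intro prev; rfl
  | cons d rest ih =>
    intro prev
    cases hv : (d.get? k).getD none with
    | none =>
      simp only [colFill, hv, aMain, List.foldl_cons, aStep]
      have hq := aFold_prev_not_mem ks (d.insert k ((prev.get? k).getD none)) prev k hk
      rw [← ih, hq]
    | some v =>
      simp only [colFill, hv, aMain, List.foldl_cons, aStep]
      have hagree : ∀ j ∈ ks, prev.get? j = (prev.insert k (some v)).get? j := by
        intro j hj
        rw [PySem.Dict.get?_insert, if_neg (by rintro rfl; exact hk hj)]
      obtain ⟨h1, h2⟩ := aFold_cong ks d prev (prev.insert k (some v)) hagree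
      rw [h1, aMain_cong _ ks _ _ (fun j hj => h2 j (hagree j hj)), ← ih,
        aFold_prev_not_mem ks _ _ k hk, PySem.Dict.get?_insert_self]
      rfl

theorem aMain_nil_keys (dl : List (PySem.Dict String (Option Int)))
    (prev : PySem.Dict String (Option Int)) : aMain dl [] prev = dl := by
  induction dl with
  | nil => rfl
  | cons d rest ih => simp only [aMain, List.foldl_nil, ih]

theorem aMain_eq_colFills (keys : List String) (hnd : keys.Nodup) :
    ∀ (dl : List (PySem.Dict String (Option Int))) (prev : PySem.Dict String (Option Int)),
    aMain dl keys prev =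
      keys.foldl (fun ndl k => colFill ndl k ((prev.get? k).getD none)) dl := by
  induction keys with
  | nil => intro dl prev; exact aMain_nil_keys dl prev
  | cons k ks ih =>
    intro dl prev
    rw [List.nodup_cons] at hnd
    rw [List.foldl_cons, ← ih hnd.2, ← aMain_swap ks k hnd.1]

-- ---------- a colFill is a zipWith of inserts against the forward-filled column ----------

theorem map_replace_eq_self {k : String} {w : Option Int} :
    ∀ (l : List (String × Option Int)), (l.map Prod.fst).Nodup → (k, w) ∈ l →
    l.map (fun p => if (p.1 == k) = true then (k, w) else p) = l := by
  intro l
  induction l with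
  | nil => intro _ h; cases h
  | cons p t ih =>
    intro hnd h
    simp only [List.map_cons, List.nodup_cons] at hnd
    rcases List.mem_cons.mp h with h | h
    · subst h
      simp only [List.map_cons, beq_self_eq_true, if_true]
      congr 1
      refine (List.map_congr_left ?_).trans (List.map_id t)
      intro q hq
      have hq1 : q.1 ≠ k := by
        rintro hq1
        exact hnd.1 (List.mem_map.mpr ⟨q, hq, hq1⟩)
      simp [hq1]
    · have hpk : p.1 ≠ k := by
        rintro hq1
        exact hnd.1 (List.mem_map.mpr ⟨(k, w), h, hq1.symm⟩)
      simp only [List.map_cons]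
      rw [if_neg (by simp [hpk] : ¬((p.1 == k) = true)), ih hnd.2 h]

theorem insert_noop (d : PySem.Dict String (Option Int)) (k : String) (w : Option Int)
    (hnd : d.keys.Nodup) (h : d.get? k = some w) : d.insert k w = d := by
  have hc : d.contains k = true := by rw [PySem.Dict.contains_eq_isSome_get?, h]; rfl
  apply PySem.Dict.ext
  rw [PySem.Dict.items_insert_of_contains d w hc]
  exact map_replace_eq_self d.items hnd (PySem.Dict.mem_items_of_get?_eq_some d h)

theorem colFill_eq_zipWith (ndl : List (PySem.Dict String (Option Int))) (k : String) (p : Int)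
    (hnd : ∀ d ∈ ndl, d.keys.Nodup) :
    colFill ndl k (some p) =
      List.zipWith (fun nd v => nd.insert k (some v)) ndl (ffill (colVals ndl k) p) := by
  induction ndl generalizing p with
  | nil => rfl
  | cons d rest ih =>
    have hdr : ∀ d' ∈ rest, d'.keys.Nodup := fun d' hd' => hnd d' (by simp [hd'])
    cases hv : (d.get? k).getD none with
    | none =>
      simp only [colFill, hv, colVals, List.map_cons, ffill, List.zipWith_cons_cons]
      exact congrArg _ (ih p hdr)
    | some v =>
      have hg : d.get? k = some (some v) := by
        cases hq : d.get? k with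
        | none => rw [hq] at hv; simp at hv
        | some o => rw [hq] at hv; simp at hv; rw [hv]
      simp only [colFill, hv, colVals, List.map_cons, ffill, List.zipWith_cons_cons]
      rw [insert_noop d k (some v) (hnd d (by simp)) hg]
      exact congrArg _ (ih v hdr)

theorem colVals_colFill_ne (ndl : List (PySem.Dict String (Option Int))) (k k' : String)
    (p : Option Int) (h : k' ≠ k) : colVals (colFill ndl k p) k' = colVals ndl k' := by
  induction ndl generalizing p with
  | nil => rfl
  | cons d rest ih =>
    simp only [colVals] at ih ⊢
    cases hv : (d.get? k).getD none with
    | none =>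
      simp only [colFill, hv, List.map_cons]
      rw [PySem.Dict.get?_insert, if_neg h, ih]
    | some v =>
      simp only [colFill, hv, List.map_cons]
      rw [ih]

theorem nodup_colFill (ndl : List (PySem.Dict String (Option Int))) (k : String) (p : Option Int)
    (hnd : ∀ d ∈ ndl, d.keys.Nodup) : ∀ d ∈ colFill ndl k p, d.keys.Nodup := by
  induction ndl generalizing p with
  | nil => intro d hd; cases hd
  | cons d rest ih =>
    have hdr : ∀ d' ∈ rest, d'.keys.Nodup := fun d' hd' => hnd d' (by simp [hd'])
    intro d' hd'
    cases hv : (d.get? k).getD none <;> simp only [colFill, hv, List.mem_cons] at hd' <;>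
      rcases hd' with h | h
    · exact h ▸ PySem.Dict.nodup_keys_insert _ _ _ (hnd d (by simp))
    · exact ih p hdr d' h
    · exact h ▸ hnd d (by simp)
    · exact ih _ hdr d' h

-- the fold of colFills equals the fold of zipWiths against columns of the ORIGINAL list
theorem foldl_colFill_eq_zip (ks : List String) (dl : List (PySem.Dict String (Option Int)))
    (prev : PySem.Dict String (Option Int)) (hnd : ks.Nodup) (hrows : ∀ d ∈ dl, d.keys.Nodup)
    (hp : ∀ k ∈ ks, ∃ p, (prev.get? k).getD none = some p) :
    ks.foldl (fun ndl k => colFill ndl k ((prev.get? k).getD none)) dl =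
      ks.foldl (fun ndl k =>
        List.zipWith (fun nd v => nd.insert k (some v)) ndl
          (ffill (colVals dl k) (((prev.get? k).getD none).getD 0))) dl := by
  induction ks generalizing dl with
  | nil => rfl
  | cons k ks ih =>
    rw [List.nodup_cons] at hnd
    obtain ⟨p, hpk⟩ := hp k (by simp)
    have hstep : colFill dl k ((prev.get? k).getD none) =
        List.zipWith (fun nd v => nd.insert k (some v)) dl
          (ffill (colVals dl k) (((prev.get? k).getD none).getD 0)) := by
      rw [hpk]; exact colFill_eq_zipWith dl k p hrows
    simp only [List.foldl_cons]
    rw [ih (colFill dl k ((prev.get? k).getD none)) hnd.2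
      (nodup_colFill dl k ((prev.get? k).getD none) hrows) (fun j hj => hp j (by simp [hj]))]
    rw [hstep]
    refine PySem.List.foldl_congr_mem ks _ _ _ ?_
    intro acc j hj
    have hcv : colVals (colFill dl k ((prev.get? k).getD none)) j = colVals dl j :=
      colVals_colFill_ne dl k j ((prev.get? k).getD none) (by rintro rfl; exact hnd.1 hj)
    rw [← hstep, hcv]

-- ---------- pointwise value of the fold of zipWiths ----------

theorem zipfold_length (ks : List String) (dl : List (PySem.Dict String (Option Int)))
    (C : String → List Int) (h : ∀ k ∈ ks, (C k).length = dl.length) :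
    (ks.foldl (fun ndl k => List.zipWith (fun nd v => nd.insert k (some v)) ndl (C k)) dl).length
      = dl.length := by
  induction ks generalizing dl with
  | nil => rfl
  | cons k ks ih =>
    simp only [List.foldl_cons]
    have hlen : (List.zipWith (fun nd v => nd.insert k (some v)) dl (C k)).length = dl.length := by
      rw [List.length_zipWith, h k (by simp), min_self]
    rw [ih _ (fun j hj => (h j (by simp [hj])).trans hlen.symm), hlen]

theorem zipfold_get (ks : List String) (dl : List (PySem.Dict String (Option Int)))
    (C : String → List Int) (h : ∀ k ∈ ks, (C k).length = dl.length) (i : Nat) (hi : i < dl.length) :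
    (ks.foldl (fun ndl k => List.zipWith (fun nd v => nd.insert k (some v)) ndl (C k)) dl)[i]? =
      some (ks.foldl (fun nd k => nd.insert k (some ((C k).getD i 0))) dl[i]) := by
  induction ks generalizing dl with
  | nil => simp [List.getElem?_eq_getElem hi]
  | cons k ks ih =>
    simp only [List.foldl_cons]
    have hck := h k (by simp)
    have hlen : (List.zipWith (fun nd v => nd.insert k (some v)) dl (C k)).length = dl.length := by
      rw [List.length_zipWith, hck, min_self]
    have hi' : i < (List.zipWith (fun nd v => nd.insert k (some v)) dl (C k)).length := by omega
    rw [ih _ (fun j hj => (h j (by simp [hj])).trans hlen.symm) (hlen ▸ hi)]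
    congr 2
    rw [List.getElem_zipWith (h := hi'), List.getD_eq_getElem (C k) 0 (by omega)]

-- ---------- A's validation pass ----------

theorem aFirstLoop_ne_none (dl : List (PySem.Dict String (Option Int))) (k : String)
    (h : ∃ d ∈ dl, (d.get? k).getD none ≠ none) : aFirstLoop dl k ≠ none := by
  induction dl with
  | nil => obtain ⟨d, hd, _⟩ := h; cases hd
  | cons d rest ih =>
    cases hv : (d.get? k).getD none with
    | some v => simp [aFirstLoop, hv]
    | none =>
      simp only [aFirstLoop, hv]
      rcases h with ⟨d', hd', hne⟩
      rcases List.mem_cons.mp hd' with rfl | hmem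
      · exact absurd hv hne
      · exact ih ⟨d', hmem, hne⟩

theorem aFirstNonnull_items (dl : List (PySem.Dict String (Option Int))) (keys : List String)
    (hnd : keys.Nodup) (h : ∀ k ∈ keys, aFirstLoop dl k ≠ none) :
    (aFirstNonnull dl keys).items =
      keys.map (fun k => (k, some ((aFirstLoop dl k).getD 0))) := by
  unfold aFirstNonnull
  rw [PySem.List.foldl_congr_mem keys _
    (fun fn k => fn.insert k (some ((aFirstLoop dl k).getD 0))) PySem.Dict.empty ?_]
  · have hfresh := PySem.Dict.items_foldl_insert_fresh keys (fun a => a)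
      (fun a => some ((aFirstLoop dl a).getD 0)) PySem.Dict.empty
      (fun a _ => PySem.Dict.contains_empty a) (by simpa using hnd)
    simpa using hfresh
  · intro acc k hk
    cases hq : aFirstLoop dl k with
    | none => exact absurd hq (h k hk)
    | some v => simp [hq]

-- ---------- B-side: the sparse points and the run expansion ----------

theorem bPts_eq_ptsFrom (dl : List (PySem.Dict String (Option Int))) (k : String) :
    ∀ s, (PySem.List.enumerate dl s).filterMap
        (fun p => ((p.2.get? k).getD none).map (fun v => (p.1, v))) = ptsFrom s (colVals dl k) := by
  induction dl with
  | nil => intro s; rfl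
  | cons d rest ih =>
    intro s
    rw [PySem.List.enumerate_cons]
    simp only [colVals] at ih ⊢
    cases hv : (d.get? k).getD none with
    | none =>
      simp only [List.filterMap_cons, hv, Option.map_none, List.map_cons, ptsFrom]
      exact ih (s + 1)
    | some v =>
      simp only [List.filterMap_cons, hv, Option.map_some, List.map_cons, ptsFrom]
      exact congrArg _ (ih (s + 1))

theorem ptsFrom_ge (vals : List (Option Int)) : ∀ s p, p ∈ ptsFrom s vals → s ≤ p.1 := by
  induction vals with
  | nil => intro s p hp; cases hp
  | cons v r ih =>
    intro s p hp
    cases v with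
    | none => exact le_trans (by omega) (ih (s + 1) p hp)
    | some w =>
      rcases List.mem_cons.mp hp with rfl | hmem
      · exact le_refl _
      · exact le_trans (by omega) (ih (s + 1) p hmem)

theorem bRuns_ptsFrom (vals : List (Option Int)) : ∀ (s i v : Int), i ≤ s →
    bRuns ((i, v) :: ptsFrom s vals) (s + vals.length) =
      List.replicate (s - i).toNat v ++ ffill vals v := by
  induction vals with
  | nil =>
    intro s i v hle
    simp [bRuns, ptsFrom, ffill]
  | cons w r ih =>
    intro s i v hle
    cases w with
    | none =>
      have : (s : Int) + (List.length (none :: r) : Int) = (s + 1) + (r.length : Int) := by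
        simp; omega
      rw [show ptsFrom s (none :: r) = ptsFrom (s + 1) r from rfl, this,
        ih (s + 1) i v (by omega)]
      have hrep : (s + 1 - i).toNat = (s - i).toNat + 1 := by omega
      rw [hrep, List.replicate_succ' ]
      simp [ffill, List.append_assoc]
    | some w =>
      rw [show ptsFrom s (some w :: r) = (s, w) :: ptsFrom (s + 1) r from rfl]
      have : (s : Int) + (List.length (some w :: r) : Int) = (s + 1) + (r.length : Int) := by
        simp; omega
      rw [show bRuns ((i, v) :: (s, w) :: ptsFrom (s + 1) r) (s + (List.length (some w :: r) : Int))
          = List.replicate (s - i).toNat v ++ bRuns ((s, w) :: ptsFrom (s + 1) r) (s + (List.length (some w :: r) : Int)) from ?_]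
      · rw [this, ih (s + 1) s w (by omega)]
        simp [ffill]
      · cases hq : ptsFrom (s + 1) r <;> simp [bRuns]

theorem ffill_of_ptsFrom (vals : List (Option Int)) : ∀ (s i0 v0 : Int) rest,
    ptsFrom s vals = (i0, v0) :: rest →
    List.replicate (i0 - s).toNat v0 ++ bRuns ((i0, v0) :: rest) (s + vals.length) =
      ffill vals v0 := by
  induction vals with
  | nil => intro s i0 v0 rest h; cases h
  | cons w r ih =>
    intro s i0 v0 rest h
    cases w with
    | none =>
      rw [show ptsFrom s (none :: r) = ptsFrom (s + 1) r from rfl] at h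
      have hge : s + 1 ≤ i0 := ptsFrom_ge r (s + 1) (i0, v0) (h ▸ List.mem_cons_self ..)
      have hlen : (s : Int) + (List.length (none :: r) : Int) = (s + 1) + (r.length : Int) := by
        simp; omega
      rw [hlen, show ffill (none :: r) v0 = v0 :: ffill r v0 from rfl, ← ih (s + 1) i0 v0 rest h]
      have hrep : (i0 - s).toNat = (i0 - (s + 1)).toNat + 1 := by omega
      rw [hrep, List.replicate_succ]
      simp
    | some w =>
      rw [show ptsFrom s (some w :: r) = (s, w) :: ptsFrom (s + 1) r from rfl] at h
      obtain ⟨h1, h2⟩ := List.cons_eq_cons.mp h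
      obtain ⟨hi, hv⟩ := Prod.mk.injEq .. ▸ h1
      subst hi; subst hv; subst h2
      have hlen : (s : Int) + (List.length (some w :: r) : Int) = (s + 1) + (r.length : Int) := by
        simp; omega
      rw [hlen, bRuns_ptsFrom r (s + 1) s w (by omega)]
      simp [ffill]

-- head value of the points = A's first non-null
theorem ptsFrom_head (dl : List (PySem.Dict String (Option Int))) (k : String) :
    ∀ s, (ptsFrom s (colVals dl k)).head?.map Prod.snd = aFirstLoop dl k := by
  induction dl with
  | nil => intro s; rfl
  | cons d rest ih =>
    intro s
    cases hv : (d.get? k).getD none <;>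
      simp only [colVals, List.map_cons, ptsFrom, aFirstLoop, hv]
    · exact ih (s + 1)
    · rfl

-- B's column dict, under the precondition
theorem bColsM_eq (dl : List (PySem.Dict String (Option Int))) :
    ∀ (keys : List String) (init : PySem.Dict String (List Int)),
    (∀ k ∈ keys, aFirstLoop dl k ≠ none) →
    List.foldlM (fun cols k =>
      match bPts dl k with
      | [] => none
      | (i0, v0) :: rest =>
          some (cols.insert k
            (List.replicate i0.toNat v0 ++ bRuns ((i0, v0) :: rest) (PySem.List.len dl))))
      init keys
    = some (keys.foldl
        (fun cols k => cols.insert k (ffill (colVals dl k) ((aFirstLoop dl k).getD 0))) init) := by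
  intro keys
  induction keys with
  | nil => intro init _; rfl
  | cons k ks ih =>
    intro init h
    have hfl := h k (by simp)
    have hpts : bPts dl k = ptsFrom 0 (colVals dl k) := bPts_eq_ptsFrom dl k 0
    cases hq : ptsFrom 0 (colVals dl k) with
    | nil =>
      exfalso; apply hfl
      rw [← ptsFrom_head dl k 0, hq]; rfl
    | cons p rest =>
      obtain ⟨i0, v0⟩ := p
      have hv0 : aFirstLoop dl k = some v0 := by
        rw [← ptsFrom_head dl k 0, hq]; rfl
      have hcol : List.replicate i0.toNat v0 ++ bRuns ((i0, v0) :: rest) (PySem.List.len dl)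
          = ffill (colVals dl k) ((aFirstLoop dl k).getD 0) := by
        have hff := ffill_of_ptsFrom (colVals dl k) 0 i0 v0 rest hq
        rw [hv0]
        simpa [PySem.List.len_eq, length_colVals] using hff
      rw [List.foldlM_cons]
      simp only [hpts, hq, hcol]
      simpa using ih (init.insert k (ffill (colVals dl k) ((aFirstLoop dl k).getD 0)))
        (fun j hj => h j (by simp [hj]))

theorem bCols_eq (dl : List (PySem.Dict String (Option Int))) (keys : List String)
    (h : ∀ k ∈ keys, aFirstLoop dl k ≠ none) :
    bCols dl keys = some (keys.foldl
      (fun cols k => cols.insert k (ffill (colVals dl k) ((aFirstLoop dl k).getD 0)))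
      PySem.Dict.empty) := bColsM_eq dl keys PySem.Dict.empty h

-- ---------- the validation dict and the column dict, looked up ----------

theorem fn_keys (dl : List (PySem.Dict String (Option Int))) (keys : List String)
    (hnd : keys.Nodup) (h : ∀ k ∈ keys, aFirstLoop dl k ≠ none) :
    (aFirstNonnull dl keys).keys = keys := by
  simp only [PySem.Dict.keys, aFirstNonnull_items dl keys hnd h, List.map_map]
  simp [Function.comp_def]

theorem fn_get (dl : List (PySem.Dict String (Option Int))) (keys : List String)
    (hnd : keys.Nodup) (h : ∀ k ∈ keys, aFirstLoop dl k ≠ none) (k : String) (hk : k ∈ keys) :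
    (aFirstNonnull dl keys).get? k = some (some ((aFirstLoop dl k).getD 0)) := by
  apply PySem.Dict.get?_of_mem_items
  · rw [aFirstNonnull_items dl keys hnd h]
    exact List.mem_map_of_mem hk
  · rw [fn_keys dl keys hnd h]
    exact hnd

theorem colsD_getD (dl : List (PySem.Dict String (Option Int))) (keys : List String)
    (hnd : keys.Nodup) (k : String) (hk : k ∈ keys) :
    (keys.foldl (fun cols k => cols.insert k (ffill (colVals dl k) ((aFirstLoop dl k).getD 0)))
      PySem.Dict.empty).getD k []
      = ffill (colVals dl k) ((aFirstLoop dl k).getD 0) := by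
  have h2 : (keys.foldl
      (fun cols k => cols.insert k (ffill (colVals dl k) ((aFirstLoop dl k).getD 0)))
      PySem.Dict.empty).items
      = keys.map (fun a => (a, ffill (colVals dl a) ((aFirstLoop dl a).getD 0))) := by
    simpa using PySem.Dict.items_foldl_insert_fresh keys (fun a => a)
      (fun a => ffill (colVals dl a) ((aFirstLoop dl a).getD 0)) PySem.Dict.empty
      (fun a _ => PySem.Dict.contains_empty a) (by simpa using hnd)
  apply PySem.Dict.getD_of_mem_items
  · rw [h2]; exact List.mem_map_of_mem hk
  · simp only [PySem.Dict.keys, h2, List.map_map]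
    simpa [Function.comp_def] using hnd

theorem upd_items (keys : List String) (hnd : keys.Nodup) (g : String → Int) :
    (keys.foldl (fun u k => u.insert k (g k)) (PySem.Dict.empty : PySem.Dict String Int)).items
      = keys.map (fun k => (k, g k)) := by
  simpa using PySem.Dict.items_foldl_insert_fresh keys (fun a => a) g PySem.Dict.empty
    (fun a _ => PySem.Dict.contains_empty a) (by simpa using hnd)

-- ===== VERDICT (by name: the statement is the Claim_ definition above) =====
theorem interpolate_using_previous_spec : Claim_equal_interpolate_using_previous := by
  intro dictlist keys _hdom hpre
  obtain ⟨hne, hnodup, hkeys⟩ := hpre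
  unfold Spec_interpolate_using_previous interpolate_using_previous interpolate_using_previous_alt
  have hrows : ∀ d ∈ dictlist.map PySem.Dict.ofList, (PySem.Dict.keys d).Nodup := by
    intro d hd
    obtain ⟨l, -, rfl⟩ := List.mem_map.mp hd
    exact PySem.Dict.nodup_keys_ofList l
  have hfl : ∀ k ∈ keys, aFirstLoop (dictlist.map PySem.Dict.ofList) k ≠ none := by
    intro k hk
    obtain ⟨-, d0, hd0, hnn⟩ := hkeys k hk
    exact aFirstLoop_ne_none _ k ⟨PySem.Dict.ofList d0, List.mem_map_of_mem hd0, hnn⟩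
  have hpos : 0 < dictlist.length := List.length_pos_of_ne_nil hne
  have hlen0 : ¬ (dictlist.map PySem.Dict.ofList).length < 1 := by
    rw [List.length_map]; omega
  set dl := dictlist.map PySem.Dict.ofList with hdl
  set C : String → List Int :=
    fun k => ffill (colVals dl k) ((aFirstLoop dl k).getD 0) with hC
  have hClen : ∀ k ∈ keys, (C k).length = dl.length :=
    fun k _ => (length_ffill _ _).trans (length_colVals dl k)
  simp only [if_neg hlen0]
  rw [if_neg (show ¬ (aFirstNonnull dl keys).keys.length ≠ keys.length from by
    rw [fn_keys dl keys hnodup hfl]; exact fun hc => hc rfl)]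
  rw [bCols_eq dl keys hfl]
  dsimp only
  rw [aMain_eq_colFills keys hnodup dl (aFirstNonnull dl keys)]
  rw [foldl_colFill_eq_zip keys dl (aFirstNonnull dl keys) hnodup hrows
    (fun k hk => ⟨(aFirstLoop dl k).getD 0, by rw [fn_get dl keys hnodup hfl k hk]; rfl⟩)]
  rw [PySem.List.foldl_congr_mem keys _
    (fun ndl k => List.zipWith (fun nd v => nd.insert k (some v)) ndl (C k)) dl
    (fun acc k hk => by rw [fn_get dl keys hnodup hfl k hk]; rfl)]
  apply List.ext_getElem
  · rw [List.length_map, List.length_map, zipfold_length keys dl C hClen,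
      PySem.List.length_enumerate]
  · intro i h1 h2
    have hidl : i < dl.length := by
      rw [List.length_map, zipfold_length keys dl C hClen] at h1; exact h1
    rw [List.getElem_map, List.getElem_map, PySem.List.getElem_enumerate]
    have hz := zipfold_get keys dl C hClen i hidl
    have hfold : (keys.foldl
        (fun ndl k => List.zipWith (fun nd v => nd.insert k (some v)) ndl (C k)) dl)[i]'(by
          rw [zipfold_length keys dl C hClen]; exact hidl)
        = keys.foldl (fun nd k => nd.insert k (some ((C k).getD i 0))) dl[i] := by
      rw [List.getElem?_eq_getElem (by rw [zipfold_length keys dl C hClen]; exact hidl)] at hz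
      exact Option.some.inj hz
    rw [hfold]
    dsimp only
    simp only [upd_items keys hnodup]
    rw [List.foldl_map]
    congr 1
    refine PySem.List.foldl_congr_mem keys _ _ _ ?_
    intro acc k hk
    rw [colsD_getD dl keys hnodup k hk,
      show ((0 : Int) + (i : Int)) = ((i : Nat) : Int) from by omega,
      PySem.List.pyGetD_natCast]
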